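-- pv_equiv track=rewrite | github.com/talthin/comp-tools-project | DBSCAN.py | WordVec1Hot
-- ===== SOURCE A (Python) =====
-- def WordVec1Hot(tfidf,idf,TopTF,testVec, Art,No):
--     n = len(tfidf) #Amount of clusters (aka amount of categories in MoD)
--     m = No*len(TopTF) #Amount of words in our vocabulary
--     ArtVecs = []
--
--     for k in range(len(Art)):
--         ArtVec = [0]*m
--         for i in range(len(TopTF)):
--             for j in range(len(TopTF[i])):
--                 if list(TopTF[i].keys())[j] in Art[k]:
--                     ArtVec[j+i*No] = 1
--
--         ArtVecs.append(ArtVec)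
--
--
--     return ArtVecs
-- ===== SOURCE B (Python) =====
-- def WordVec1Hot(tfidf, idf, TopTF, testVec, Art, No):
--     m = No * len(TopTF)
--     # inverted index: word -> all its one-hot positions across categories
--     index = {}
--     for i, cat in enumerate(TopTF):
--         for j, w in enumerate(cat):
--             index.setdefault(w, []).append(i * No + j)
--     ArtVecs = []
--     for art in Art:
--         vec = [0] * m
--         for w in art:
--             for p in index.get(w, []):
--                 vec[p] = 1
--         ArtVecs.append(vec)
--     return ArtVecs
-- ===== Notes on version B (the rewrite author's own statement) =====
-- stated objective: faster
-- what changed: A scans the whole vocabulary for every article and tests each vocabulary word for membership in the article (rebuilding the key list per word); B builds an inverted index word -> one-hot positions once and then, per article, only sets the positions of the words actually occurring in that article.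
import Mathlib
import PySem

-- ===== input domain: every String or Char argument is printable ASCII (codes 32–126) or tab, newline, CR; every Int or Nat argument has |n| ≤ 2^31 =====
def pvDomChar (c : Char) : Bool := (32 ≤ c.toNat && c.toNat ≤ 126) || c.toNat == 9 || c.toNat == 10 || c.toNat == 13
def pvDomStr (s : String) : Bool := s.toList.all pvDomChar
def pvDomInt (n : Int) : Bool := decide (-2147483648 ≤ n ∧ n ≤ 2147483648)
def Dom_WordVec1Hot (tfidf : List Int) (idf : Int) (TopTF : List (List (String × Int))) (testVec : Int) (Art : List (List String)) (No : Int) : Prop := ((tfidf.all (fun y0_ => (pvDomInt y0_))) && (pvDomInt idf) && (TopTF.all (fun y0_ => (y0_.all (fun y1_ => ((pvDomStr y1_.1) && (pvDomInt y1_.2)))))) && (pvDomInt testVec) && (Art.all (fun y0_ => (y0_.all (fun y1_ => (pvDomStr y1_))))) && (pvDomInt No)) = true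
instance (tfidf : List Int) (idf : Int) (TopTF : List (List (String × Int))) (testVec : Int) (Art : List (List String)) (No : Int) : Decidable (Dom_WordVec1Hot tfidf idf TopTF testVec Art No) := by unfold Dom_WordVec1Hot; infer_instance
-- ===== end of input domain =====

-- B replaces A's per-article scan over the whole vocabulary (membership test per vocabulary
-- word) by an inverted index word -> one-hot positions built once, then sets only the
-- positions of the words actually occurring in each article (objective: faster).

-- ===== PORT A =====
-- Transliteration of Source A.  Python dicts arrive as association lists; Python's dict
-- reconstruction keeps the FIRST occurrence of each key, so 'list(d.keys())' is
-- 'PySem.List.dedup (cat.map Prod.fst)' and 'len(d)' is its length.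
-- 'ArtVec[j+i*No] = 1' is 'PySem.List.pySetD' (exact incl. negative-index wrap; on an
-- out-of-range index Python raises IndexError — those inputs are outside Pre_ below).
def WordVec1Hot (tfidf : List Int) (idf : Int) (TopTF : List (List (String × Int))) (testVec : Int) (Art : List (List String)) (No : Int) : List (List Int) :=
  let _n := tfidf.length
  let m : Int := No * (TopTF.length : Int)
  (PySem.List.pyRange 0 (Art.length : Int) 1).foldl (fun ArtVecs k =>
    let art := PySem.List.pyGetD Art k []
    let ArtVec :=
      (PySem.List.pyRange 0 (TopTF.length : Int) 1).foldl (fun v i =>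
        let cat := PySem.List.pyGetD TopTF i []
        let keys := PySem.List.dedup (cat.map Prod.fst)
        (PySem.List.pyRange 0 (keys.length : Int) 1).foldl (fun v j =>
          if PySem.List.pyGetD keys j "" ∈ art then PySem.List.pySetD v (j + i * No) 1 else v) v)
        (PySem.List.pyRepeat [0] m)
    ArtVecs ++ [ArtVec]) []

-- ===== PORT B =====
-- B-side helper: the inverted index word -> one-hot positions (Source B's first loop;
-- 'index.setdefault(w, []).append(p)' is 'Dict.modify w [] (· ++ [p])': insert [p] when
-- absent, append in place when present).
def pvIndex (TopTF : List (List (String × Int))) (No : Int) : PySem.Dict String (List Int) :=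
  (PySem.List.enumerate TopTF).foldl (fun d ic =>
    (PySem.List.enumerate (PySem.List.dedup (ic.2.map Prod.fst))).foldl
      (fun d jw => d.modify jw.2 [] (· ++ [ic.1 * No + jw.1])) d)
    (PySem.Dict.mk [])

-- Transliteration of Source B.
def WordVec1Hot_alt (tfidf : List Int) (idf : Int) (TopTF : List (List (String × Int))) (testVec : Int) (Art : List (List String)) (No : Int) : List (List Int) :=
  let m : Int := No * (TopTF.length : Int)
  let index := pvIndex TopTF No
  Art.foldl (fun ArtVecs art =>
    let vec := art.foldl (fun v w =>
      (index.getD w []).foldl (fun v p => PySem.List.pySetD v p 1) v)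
      (PySem.List.pyRepeat [0] m)
    ArtVecs ++ [vec]) []

-- ===== PRECONDITION & SPEC =====
-- Pre_ excludes exactly the inputs on which A raises IndexError: some word of the
-- vocabulary occurs in some article and its one-hot position j + i*No falls outside the
-- Python index range [-m, m) of the article vector of length m = No*len(TopTF).
def Pre_WordVec1Hot (tfidf : List Int) (idf : Int) (TopTF : List (List (String × Int))) (testVec : Int) (Art : List (List String)) (No : Int) : Prop :=
  ∀ ic ∈ PySem.List.enumerate TopTF,
    ∀ jw ∈ PySem.List.enumerate (PySem.List.dedup (ic.2.map Prod.fst)),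
      (∃ art ∈ Art, jw.2 ∈ art) →
        PySem.Raise.InRange (No * (TopTF.length : Int)).toNat (jw.1 + ic.1 * No)
instance (tfidf : List Int) (idf : Int) (TopTF : List (List (String × Int))) (testVec : Int) (Art : List (List String)) (No : Int) : Decidable (Pre_WordVec1Hot tfidf idf TopTF testVec Art No) := by unfold Pre_WordVec1Hot; infer_instance

def pvWitness_WordVec1Hot : List Int × Int × (List (List (String × Int))) × Int × List (List String) × Int :=
  ([], 0, [[("a", 1), ("b", 2)]], 0, [["a", "c"], []], 2)

def Spec_WordVec1Hot (tfidf : List Int) (idf : Int) (TopTF : List (List (String × Int))) (testVec : Int) (Art : List (List String)) (No : Int) (out : List (List Int)) : Prop := out = WordVec1Hot_alt tfidf idf TopTF testVec Art No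
instance (tfidf : List Int) (idf : Int) (TopTF : List (List (String × Int))) (testVec : Int) (Art : List (List String)) (No : Int) (out : List (List Int)) : Decidable (Spec_WordVec1Hot tfidf idf TopTF testVec Art No out) := by unfold Spec_WordVec1Hot; infer_instance

-- ===== CLAIM (what is proved, stated in full; the proofs are below) =====
def Claim_equal_WordVec1Hot : Prop := ∀ (tfidf : List Int) (idf : Int) (TopTF : List (List (String × Int))) (testVec : Int) (Art : List (List String)) (No : Int), Dom_WordVec1Hot tfidf idf TopTF testVec Art No → Pre_WordVec1Hot tfidf idf TopTF testVec Art No → Spec_WordVec1Hot tfidf idf TopTF testVec Art No (WordVec1Hot tfidf idf TopTF testVec Art No)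

-- ===== LEMMAS AND PROOFS =====

-- setting a list of positions to 1, one pySetD at a time
def pvSetAll (v : List Int) (ps : List Int) : List Int :=
  ps.foldl (fun v p => PySem.List.pySetD v p 1) v

theorem pvGetElem?_pySetD (v : List Int) (p : Int) (t : Nat) :
    (PySem.List.pySetD v p 1)[t]? =
      if PySem.List.pyIdx? v.length p = some t then some 1 else v[t]? := by
  unfold PySem.List.pySetD PySem.List.pySet?
  rcases h : PySem.List.pyIdx? v.length p with _ | k
  · simp
  · have hk : k < v.length := by
      unfold PySem.List.pyIdx? at h
      split_ifs at h with h1 h2 h3 <;> simp_all <;> omega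
    simp only [Option.map_some, Option.getD_some]
    by_cases ht : k = t
    · subst ht; simp [hk]
    · simp [List.getElem?_set_ne (by omega : k ≠ t), ht]

-- elementwise description of pvSetAll: position t becomes 1 iff some p in ps points at it
theorem pvSetAll_getElem? (v : List Int) (ps : List Int) (t : Nat) :
    (pvSetAll v ps)[t]? =
      if ∃ p ∈ ps, PySem.List.pyIdx? v.length p = some t then some 1 else v[t]? := by
  induction ps generalizing v with
  | nil => simp [pvSetAll]
  | cons p ps ih =>
    have hlen : (PySem.List.pySetD v p 1).length = v.length := PySem.List.length_pySetD v p 1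
    simp only [pvSetAll, List.foldl_cons]
    rw [show List.foldl (fun v p => PySem.List.pySetD v p 1) (PySem.List.pySetD v p 1) ps
        = pvSetAll (PySem.List.pySetD v p 1) ps from rfl, ih, hlen, pvGetElem?_pySetD]
    by_cases hp : ∃ q ∈ ps, PySem.List.pyIdx? v.length q = some t
    · rw [if_pos hp, if_pos ?_]
      obtain ⟨q, hq, hq2⟩ := hp
      exact ⟨q, List.mem_cons_of_mem _ hq, hq2⟩
    · rw [if_neg hp]
      by_cases h1 : PySem.List.pyIdx? v.length p = some t
      · rw [if_pos h1, if_pos ⟨p, List.mem_cons_self, h1⟩]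
      · rw [if_neg h1, if_neg ?_]
        rintro ⟨q, hq, hq2⟩
        rcases List.mem_cons.mp hq with rfl | hq
        · exact h1 hq2
        · exact hp ⟨q, hq, hq2⟩

-- pvSetAll depends only on the SET of positions
theorem pvSetAll_congr (v : List Int) (ps qs : List Int)
    (h : ∀ p, p ∈ ps ↔ p ∈ qs) : pvSetAll v ps = pvSetAll v qs := by
  apply List.ext_getElem?
  intro t
  rw [pvSetAll_getElem?, pvSetAll_getElem?]
  by_cases hp : ∃ p ∈ ps, PySem.List.pyIdx? v.length p = some t
  · obtain ⟨p, hp1, hp2⟩ := hp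
    rw [if_pos ⟨p, hp1, hp2⟩, if_pos ⟨p, (h p).mp hp1, hp2⟩]
  · rw [if_neg hp, if_neg ?_]
    rintro ⟨p, hp1, hp2⟩
    exact hp ⟨p, (h p).mpr hp1, hp2⟩

-- A's positions for one article, as a flat list
def pvPosA (TopTF : List (List (String × Int))) (No : Int) (art : List String) : List Int :=
  (PySem.List.enumerate TopTF).flatMap (fun ic =>
    (((PySem.List.enumerate (PySem.List.dedup (ic.2.map Prod.fst))).filter
        (fun jw => decide (jw.2 ∈ art))).map (fun jw => jw.1 + ic.1 * No)))

-- all (word, position) pairs of the vocabulary, in B's construction order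
def pvPairs (TopTF : List (List (String × Int))) (No : Int) : List (String × Int) :=
  (PySem.List.enumerate TopTF).flatMap (fun ic =>
    (PySem.List.enumerate (PySem.List.dedup (ic.2.map Prod.fst))).map
      (fun jw => (jw.2, ic.1 * No + jw.1)))

-- the inverted index, characterised as a filter of pvPairs
theorem pvIndex_getD (TopTF : List (List (String × Int))) (No : Int) (w : String) :
    (pvIndex TopTF No).getD w []
      = ((pvPairs TopTF No).filter (fun pr => pr.1 == w)).map (·.2) := by
  have h1 : pvIndex TopTF No
      = (pvPairs TopTF No).foldl (fun d pr => d.modify pr.1 [] (· ++ [pr.2])) (PySem.Dict.mk []) := by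
    rw [pvIndex, pvPairs, List.foldl_flatMap]
    apply PySem.List.foldl_congr_mem
    intro acc ic _
    rw [List.foldl_map]
  rw [h1, PySem.Dict.getD_foldl_modify_append]
  simp [PySem.Dict.getD, PySem.Dict.get?]

-- membership in A's position list = membership in B's flattened index lookups
theorem pvPos_mem (TopTF : List (List (String × Int))) (No : Int) (art : List String) (q : Int) :
    q ∈ pvPosA TopTF No art ↔
      ∃ w ∈ art, q ∈ ((pvPairs TopTF No).filter (fun pr => pr.1 == w)).map (·.2) := by
  simp only [pvPosA, pvPairs, List.mem_flatMap, List.mem_map, List.mem_filter,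
    decide_eq_true_eq, beq_iff_eq]
  constructor
  · rintro ⟨ic, hic, jw, ⟨hjw, hw⟩, rfl⟩
    exact ⟨jw.2, hw, ⟨jw.2, ic.1 * No + jw.1⟩, ⟨⟨ic, hic, jw, hjw, rfl⟩, rfl⟩, Int.add_comm _ _⟩
  · rintro ⟨w, hw, pr, ⟨⟨ic, hic, jw, hjw, rfl⟩, hprw⟩, rfl⟩
    simp only at hprw ⊢
    exact ⟨ic, hic, jw, ⟨hjw, hprw ▸ hw⟩, Int.add_comm _ _⟩

-- B's per-article loop is pvSetAll of its flattened index lookups; same membership as pvPosA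
theorem pvVec_eq (TopTF : List (List (String × Int))) (No : Int) (art : List String) :
    pvSetAll (PySem.List.pyRepeat [0] (No * (TopTF.length : Int))) (pvPosA TopTF No art)
      = art.foldl (fun v w =>
          ((pvIndex TopTF No).getD w []).foldl (fun v p => PySem.List.pySetD v p 1) v)
          (PySem.List.pyRepeat [0] (No * (TopTF.length : Int))) := by
  have hB : art.foldl (fun v w =>
        ((pvIndex TopTF No).getD w []).foldl (fun v p => PySem.List.pySetD v p 1) v)
        (PySem.List.pyRepeat [0] (No * (TopTF.length : Int)))
      = pvSetAll (PySem.List.pyRepeat [0] (No * (TopTF.length : Int)))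
          (art.flatMap (fun w =>
            ((pvPairs TopTF No).filter (fun pr => pr.1 == w)).map (·.2))) := by
    rw [pvSetAll, List.foldl_flatMap]
    apply PySem.List.foldl_congr_mem
    intro acc w _
    rw [pvIndex_getD]
  rw [hB]
  apply pvSetAll_congr
  intro p
  rw [pvPos_mem]
  simp only [List.mem_flatMap]

-- A's per-article nested loops compute pvSetAll of pvPosA
theorem pvA_inner (TopTF : List (List (String × Int))) (No : Int) (art : List String)
    (v0 : List Int) :
    (PySem.List.pyRange 0 (TopTF.length : Int) 1).foldl (fun v i =>
        let cat := PySem.List.pyGetD TopTF i []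
        let keys := PySem.List.dedup (cat.map Prod.fst)
        (PySem.List.pyRange 0 (keys.length : Int) 1).foldl (fun v j =>
          if PySem.List.pyGetD keys j "" ∈ art then PySem.List.pySetD v (j + i * No) 1 else v) v) v0
    = pvSetAll v0 (pvPosA TopTF No art) := by
  rw [pvPosA, pvSetAll, List.foldl_flatMap]
  have houter : PySem.List.pyRange 0 (TopTF.length : Int) 1
      = (PySem.List.enumerate TopTF).map (·.1) := by
    rw [PySem.List.map_fst_enumerate]; simp
  rw [houter, List.foldl_map]
  apply PySem.List.foldl_congr_mem
  intro acc ic hic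
  obtain ⟨k, hk, hics⟩ := (PySem.List.mem_enumerate_iff TopTF 0 ic).mp hic
  have hic1 : ic.1 = (k : Int) := by rw [hics]; simp
  have hic2 : ic.2 = TopTF[k] := by rw [hics]
  have hget : PySem.List.pyGetD TopTF ic.1 [] = ic.2 := by
    rw [hic1, hic2, PySem.List.pyGetD_natCast, List.getD_eq_getElem?_getD,
      List.getElem?_eq_getElem hk]
    rfl
  simp only [hget]
  have hinner : PySem.List.pyRange 0 ((PySem.List.dedup (ic.2.map Prod.fst)).length : Int) 1
      = (PySem.List.enumerate (PySem.List.dedup (ic.2.map Prod.fst))).map (·.1) := by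
    rw [PySem.List.map_fst_enumerate]; simp
  rw [hinner, List.foldl_map]
  have hcongr : List.foldl (fun x (y : Int × String) =>
        if PySem.List.pyGetD (PySem.List.dedup (ic.2.map Prod.fst)) y.1 "" ∈ art then
          PySem.List.pySetD x (y.1 + ic.1 * No) 1 else x) acc
        (PySem.List.enumerate (PySem.List.dedup (ic.2.map Prod.fst)))
      = List.foldl (fun x (y : Int × String) =>
        if y.2 ∈ art then PySem.List.pySetD x (y.1 + ic.1 * No) 1 else x) acc
        (PySem.List.enumerate (PySem.List.dedup (ic.2.map Prod.fst))) := by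
    apply PySem.List.foldl_congr_mem
    intro acc' jw hjw
    obtain ⟨j, hj, hjws⟩ :=
      (PySem.List.mem_enumerate_iff (PySem.List.dedup (ic.2.map Prod.fst)) 0 jw).mp hjw
    have h1 : jw.1 = (j : Int) := by rw [hjws]; simp
    have h2 : jw.2 = (PySem.List.dedup (ic.2.map Prod.fst))[j] := by rw [hjws]
    have hgj : PySem.List.pyGetD (PySem.List.dedup (ic.2.map Prod.fst)) jw.1 "" = jw.2 := by
      rw [h1, h2, PySem.List.pyGetD_natCast, List.getD_eq_getElem?_getD,
        List.getElem?_eq_getElem hj]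
      rfl
    rw [hgj]
  rw [hcongr,
    PySem.List.foldl_ite_eq_foldl_filter (fun jw : Int × String => jw.2 ∈ art)
      (fun x (y : Int × String) => PySem.List.pySetD x (y.1 + ic.1 * No) 1),
    List.foldl_map]

-- ===== VERDICT (by name: the statement is the Claim_ definition above) =====
theorem WordVec1Hot_spec : Claim_equal_WordVec1Hot := by
  intro tfidf idf TopTF testVec Art No _hdom _hpre
  unfold Spec_WordVec1Hot
  simp only [WordVec1Hot, WordVec1Hot_alt]
  rw [PySem.List.foldl_pyRange_zero_pyGetD' Art ([] : List String)
      (fun acc art => acc ++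
        [(PySem.List.pyRange 0 (TopTF.length : Int) 1).foldl (fun v i =>
          let cat := PySem.List.pyGetD TopTF i []
          let keys := PySem.List.dedup (cat.map Prod.fst)
          (PySem.List.pyRange 0 (keys.length : Int) 1).foldl (fun v j =>
            if PySem.List.pyGetD keys j "" ∈ art then PySem.List.pySetD v (j + i * No) 1 else v) v)
          (PySem.List.pyRepeat [0] (No * (TopTF.length : Int)))]) []]
  rw [PySem.List.foldl_append_singleton_eq_map, PySem.List.foldl_append_singleton_eq_map]
  simp only [List.nil_append]
  apply List.map_congr_left
  intro art _
  rw [pvA_inner, pvVec_eq]
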